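-- pv_equiv track=rewrite | github.com/eliewolfe/mDAG-analysis | utilities.py | minimal_sets_within
-- ===== SOURCE A (Python) =====
-- from typing import Any, Iterable, Tuple, Union, List, Set
--
-- def minimal_sets_within(list_of_sets: List[Set[Any]]) -> List[Set[Any]]:
--     original_list_copy = list_of_sets.copy()
--     verified_minimal = []
--     for i in range(len(list_of_sets)):
--         candidate_minimal_set = original_list_copy.pop()
--         if not any(counterexample.issubset(candidate_minimal_set) for counterexample in (original_list_copy + verified_minimal)):
--             verified_minimal.append(candidate_minimal_set)
--     return verified_minimal
-- ===== SOURCE B (Python) =====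
-- def minimal_sets_within(list_of_sets):
--     result = []
--     for j in reversed(range(len(list_of_sets))):
--         s = list_of_sets[j]
--         if any(t < s for t in list_of_sets):
--             continue
--         if any(list_of_sets[i] == s for i in range(j)):
--             continue
--         result.append(s)
--     return result
-- ===== Notes on version B (the rewrite author's own statement) =====
-- stated objective: alternative
-- what changed: A's destructive pop-from-a-shrinking-copy pass testing each candidate against the remaining copy plus the grown accumulator is replaced by a static per-index predicate over the unchanged input: keep l[j] iff no proper subset occurs anywhere in the list and no equal set occurs at an earlier index, scanning indices in reverse to reproduce A's output order.
import Mathlib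
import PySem

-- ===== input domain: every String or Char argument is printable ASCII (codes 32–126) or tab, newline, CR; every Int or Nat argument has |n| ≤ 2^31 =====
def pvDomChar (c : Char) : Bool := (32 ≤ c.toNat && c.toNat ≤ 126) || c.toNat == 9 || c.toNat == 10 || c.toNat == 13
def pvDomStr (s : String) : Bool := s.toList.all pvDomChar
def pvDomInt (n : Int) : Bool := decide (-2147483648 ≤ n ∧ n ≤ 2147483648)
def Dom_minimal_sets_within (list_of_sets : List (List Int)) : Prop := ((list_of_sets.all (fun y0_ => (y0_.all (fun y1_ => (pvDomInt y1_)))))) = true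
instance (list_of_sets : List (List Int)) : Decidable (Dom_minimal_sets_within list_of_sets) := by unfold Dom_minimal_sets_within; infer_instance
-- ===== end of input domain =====

-- B replaces A's pop-and-accumulate pass (candidate tested against the shrinking copy plus the
-- grown accumulator) by a static per-index predicate over the unchanged input list: keep l[j]
-- iff no proper subset occurs anywhere in the list and no equal set occurs at an earlier index.
-- Objective: alternative (same output, including order; return value only — neither mutates).

-- ===== PORT A =====
-- counterexample.issubset(candidate_minimal_set)  (sets as lists of distinct elements)
def pyIssubset (t s : List Int) : Bool := t.all (fun x => s.contains x)

-- A's loop: pop the last element of the copy, test it against (remaining copy + verified), append if clear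
def pvALoop : Nat → List (List Int) → List (List Int) → List (List Int)
  | 0, _, verified => verified
  | fuel+1, copy, verified =>
    match PySem.List.pop? copy with
    | none => verified   -- unreachable: the loop runs exactly copy.length times
    | some (cand, rest) =>
      if (rest ++ verified).any (fun t => pyIssubset t cand) then
        pvALoop fuel rest verified
      else
        pvALoop fuel rest (verified ++ [cand])

def minimal_sets_within (list_of_sets : List (List Int)) : List (List Int) :=
  pvALoop list_of_sets.length list_of_sets []

-- ===== PORT B =====
def pySubsetB (t s : List Int) : Bool := t.all (fun x => s.contains x)
-- t < s : proper subset of sets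
def pyProper (t s : List Int) : Bool := pySubsetB t s && !pySubsetB s t
-- t == s : set equality
def pySetEq (t s : List Int) : Bool := pySubsetB t s && pySubsetB s t

-- for j in reversed(range(len(list_of_sets))): keep l[j] iff no proper subset anywhere
-- and no equal set at an earlier index
def minimal_sets_within_alt (list_of_sets : List (List Int)) : List (List Int) :=
  (List.range list_of_sets.length).reverse.foldl
    (fun result j =>
      let s := list_of_sets.getD j []
      if list_of_sets.any (fun t => pyProper t s) then result
      else if (list_of_sets.take j).any (fun t => pySetEq t s) then result
      else result ++ [s])
    []

-- ===== PRECONDITION & SPEC =====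
def Spec_minimal_sets_within (list_of_sets : List (List Int)) (out : List (List Int)) : Prop := out = minimal_sets_within_alt list_of_sets
instance (list_of_sets : List (List Int)) (out : List (List Int)) : Decidable (Spec_minimal_sets_within list_of_sets out) := by unfold Spec_minimal_sets_within; infer_instance

-- ===== CLAIM (what is proved, stated in full; the proofs are below) =====
def Claim_equal_minimal_sets_within : Prop := ∀ (list_of_sets : List (List Int)), Dom_minimal_sets_within list_of_sets → Spec_minimal_sets_within list_of_sets (minimal_sets_within list_of_sets)

-- ===== LEMMAS AND PROOFS =====

-- subset of sets, as a proposition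
def SubS (t s : List Int) : Prop := ∀ x ∈ t, x ∈ s

lemma subS_refl (t : List Int) : SubS t t := fun _ hx => hx

lemma subS_trans {a b c : List Int} (h1 : SubS a b) (h2 : SubS b c) : SubS a c :=
  fun x hx => h2 x (h1 x hx)

@[simp] lemma pySubsetB_iff (t s : List Int) : pySubsetB t s = true ↔ SubS t s := by
  simp [pySubsetB, SubS, List.all_eq_true]

@[simp] lemma pyIssubset_iff (t s : List Int) : pyIssubset t s = true ↔ SubS t s := by
  simp [pyIssubset, SubS, List.all_eq_true]

@[simp] lemma pyProper_iff (t s : List Int) : pyProper t s = true ↔ (SubS t s ∧ ¬ SubS s t) := by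
  simp only [pyProper, Bool.and_eq_true, Bool.not_eq_true', Bool.eq_false_iff, Ne, pySubsetB_iff]

@[simp] lemma pySetEq_iff (t s : List Int) : pySetEq t s = true ↔ (SubS t s ∧ SubS s t) := by
  simp [pySetEq]

lemma toFinset_eq_of_eqS {a b : List Int} (h1 : SubS a b) (h2 : SubS b a) :
    a.toFinset = b.toFinset := by
  ext x; simp only [List.mem_toFinset]; exact ⟨h1 x, h2 x⟩

lemma card_lt_of_proper {a b : List Int} (h1 : SubS a b) (h2 : ¬ SubS b a) :
    a.toFinset.card < b.toFinset.card := by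
  apply Finset.card_lt_card
  constructor
  · intro x hx; simp only [List.mem_toFinset] at *; exact h1 x hx
  · intro hsub
    apply h2
    intro x hx
    have : x ∈ a.toFinset := hsub (by simpa using hx)
    simpa using this

-- B's loop body, named
def stepB (l : List (List Int)) (result : List (List Int)) (j : Nat) : List (List Int) :=
  let s := l.getD j []
  if l.any (fun t => pyProper t s) then result
  else if (l.take j).any (fun t => pySetEq t s) then result
  else result ++ [s]

-- the per-index keep predicate
def keepB (l : List (List Int)) (j : Nat) : Bool :=
  !(l.any (fun t => pyProper t (l.getD j []))) && !((l.take j).any (fun t => pySetEq t (l.getD j [])))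

lemma stepB_eq (l : List (List Int)) (r : List (List Int)) (j : Nat) :
    stepB l r j = if keepB l j then r ++ [l.getD j []] else r := by
  cases h1 : l.any (fun t => pyProper t (l.getD j [])) <;>
    cases h2 : (l.take j).any (fun t => pySetEq t (l.getD j [])) <;>
    simp only [stepB, keepB, h1, h2] <;> simp

-- B's partial result: indices (l.length - 1) down to k already processed
def Bres (l : List (List Int)) (k : Nat) : List (List Int) :=
  (List.range' k (l.length - k)).reverse.foldl (stepB l) []

lemma Bres_ge (l : List (List Int)) (k : Nat) (h : l.length ≤ k) : Bres l k = [] := by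
  simp [Bres, Nat.sub_eq_zero_of_le h]

lemma Bres_succ (l : List (List Int)) (k : Nat) (h : k < l.length) :
    Bres l k = stepB l (Bres l (k + 1)) k := by
  have h1 : l.length - k = (l.length - (k + 1)) + 1 := by omega
  simp [Bres, h1, List.range'_succ, List.foldl_append]

lemma alt_eq_Bres (l : List (List Int)) : minimal_sets_within_alt l = Bres l 0 := by
  simp [minimal_sets_within_alt, Bres, stepB, List.range_eq_range']

-- membership in a partial result
lemma mem_Bres (l : List (List Int)) :
    ∀ d k, l.length ≤ k + d →
      ∀ t, (t ∈ Bres l k ↔ ∃ j, k ≤ j ∧ ∃ h : j < l.length, t = l[j] ∧ keepB l j = true) := by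
  intro d
  induction d with
  | zero =>
    intro k hk t
    rw [Bres_ge l k (by omega)]
    simp only [List.not_mem_nil, false_iff]
    rintro ⟨j, hkj, hj, -⟩
    omega
  | succ d ih =>
    intro k hk t
    by_cases hkn : l.length ≤ k
    · rw [Bres_ge l k hkn]
      simp only [List.not_mem_nil, false_iff]
      rintro ⟨j, hkj, hj, -⟩
      omega
    · have hklt : k < l.length := by omega
      rw [Bres_succ l k hklt, stepB_eq]
      have hgd : l.getD k [] = l[k] := List.getD_eq_getElem l [] hklt
      cases hkeep : keepB l k with
      | false =>
        simp only [Bool.false_eq_true, if_false]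
        rw [ih (k+1) (by omega) t]
        constructor
        · rintro ⟨j, hkj, hj, ht, hkp⟩
          exact ⟨j, by omega, hj, ht, hkp⟩
        · rintro ⟨j, hkj, hj, ht, hkp⟩
          rcases Nat.eq_or_lt_of_le hkj with rfl | h
          · rw [hkp] at hkeep; cases hkeep
          · exact ⟨j, by omega, hj, ht, hkp⟩
      | true =>
        simp only [if_true]
        rw [List.mem_append, ih (k+1) (by omega) t, List.mem_singleton]
        constructor
        · rintro (⟨j, hkj, hj, ht, hkp⟩ | ht)
          · exact ⟨j, by omega, hj, ht, hkp⟩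
          · exact ⟨k, le_refl _, hklt, by rw [ht, hgd], hkeep⟩
        · rintro ⟨j, hkj, hj, ht, hkp⟩
          rcases Nat.eq_or_lt_of_le hkj with rfl | h
          · right; rw [ht, hgd]
          · left; exact ⟨j, by omega, hj, ht, hkp⟩

lemma mem_take_getElem {t : List Int} {l : List (List Int)} {m : Nat} (h : t ∈ l.take m) :
    ∃ i, i < m ∧ ∃ hi : i < l.length, l[i] = t := by
  obtain ⟨i, hi, he⟩ := List.mem_iff_getElem.mp h
  have hlen : i < m ∧ i < l.length := by
    simp only [List.length_take, lt_min_iff] at hi; exact hi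
  exact ⟨i, hlen.1, hlen.2, by rw [← List.getElem_take (j := m)]; exact he⟩

lemma getElem_mem_take {l : List (List Int)} {i m : Nat} (h1 : i < m) (h2 : i < l.length) :
    l[i] ∈ l.take m := by
  have : (l.take m)[i]'(by simp [List.length_take]; omega) = l[i] := List.getElem_take
  rw [← this]; exact List.getElem_mem _

-- well-founded witness extraction: if some element of l is a proper subset of l[k],
-- then some element of (l.take k ++ Bres l (k+1)) is a subset of l[k]
lemma witnessW (l : List (List Int)) (k : Nat) (hk : k < l.length) :
    ∀ m j, ∀ hj : j < l.length, (l[j]).toFinset.card ≤ m →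
      SubS l[j] l[k] → ¬ SubS l[k] l[j] →
      ∃ t, (t ∈ l.take k ∨ t ∈ Bres l (k + 1)) ∧ SubS t l[k] := by
  intro m
  induction m using Nat.strong_induction_on with
  | _ m ih =>
  intro j hj hcard hsub hnsub
  rcases Nat.lt_trichotomy j k with hjk | rfl | hjk
  · exact ⟨l[j], Or.inl (getElem_mem_take hjk hj), hsub⟩
  · exact absurd hsub hnsub
  · have hgd : l.getD j [] = l[j] := List.getD_eq_getElem l [] hj
    by_cases hkeep : keepB l j = true
    · refine ⟨l[j], Or.inr ?_, hsub⟩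
      rw [mem_Bres l l.length (k + 1) (by omega)]
      exact ⟨j, by omega, hj, rfl, hkeep⟩
    · by_cases h1 : l.any (fun t => pyProper t (l.getD j [])) = true
      · -- a proper subset of l[j] exists somewhere in l: cardinality decreases
        simp only [hgd, List.any_eq_true, pyProper_iff] at h1
        obtain ⟨u, hu, husub, hunsub⟩ := h1
        obtain ⟨j', hj', hj'e⟩ := List.mem_iff_getElem.mp hu
        have hcardu : u.toFinset.card < m :=
          lt_of_lt_of_le (card_lt_of_proper husub hunsub) hcard
        exact ih u.toFinset.card hcardu j' hj' (by simp [hj'e])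
          (by rw [hj'e]; exact subS_trans husub hsub)
          (by rw [hj'e]; exact fun h => hnsub (subS_trans h husub))
      · by_cases h2 : (l.take j).any (fun t => pySetEq t (l.getD j [])) = true
        · -- an equal set occurs earlier: move to the FIRST occurrence of this set
          have hex : ∃ i, i < l.length ∧ pySetEq (l.getD i []) (l[j]) = true :=
            ⟨j, hj, by rw [List.getD_eq_getElem l [] hj]; simp [subS_refl]⟩
          obtain ⟨hi0lt, hi0eq⟩ := Nat.find_spec hex
          have hgd0 : l.getD (Nat.find hex) [] = l[Nat.find hex] :=
            List.getD_eq_getElem l [] hi0lt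
          rw [hgd0] at hi0eq
          simp only [pySetEq_iff] at hi0eq
          obtain ⟨hi0s, hi0s'⟩ := hi0eq
          rcases Nat.lt_trichotomy (Nat.find hex) k with hik | hik | hik
          · exact ⟨l[Nat.find hex], Or.inl (getElem_mem_take hik hi0lt),
              subS_trans hi0s hsub⟩
          · exact absurd (hik ▸ hi0s) hnsub
          · by_cases hp0 : l.any (fun t => pyProper t (l.getD (Nat.find hex) [])) = true
            · -- a proper subset of the first occurrence: cardinality decreases
              simp only [hgd0, List.any_eq_true, pyProper_iff] at hp0
              obtain ⟨u, hu, husub, hunsub⟩ := hp0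
              obtain ⟨j', hj', hj'e⟩ := List.mem_iff_getElem.mp hu
              have hcards : (l[Nat.find hex]).toFinset.card = (l[j]).toFinset.card := by
                rw [toFinset_eq_of_eqS hi0s hi0s']
              have hcardu : u.toFinset.card < m := by
                have := card_lt_of_proper husub hunsub
                omega
              exact ih u.toFinset.card hcardu j' hj' (by simp [hj'e])
                (by rw [hj'e]; exact subS_trans husub (subS_trans hi0s hsub))
                (by rw [hj'e]; exact fun h => hnsub (subS_trans (subS_trans h husub) hi0s))
            · -- the first occurrence is kept by B
              have hkeep0 : keepB l (Nat.find hex) = true := by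
                unfold keepB
                rw [Bool.and_eq_true, Bool.not_eq_true', Bool.not_eq_true']
                refine ⟨by simpa using hp0, ?_⟩
                rw [List.any_eq_false]
                intro t ht
                obtain ⟨i', hi'lt, hi'len, hi'e⟩ := mem_take_getElem ht
                intro hcon
                apply Nat.find_min hex hi'lt
                rw [hgd0, ← hi'e] at hcon
                simp only [pySetEq_iff] at hcon
                refine ⟨hi'len, ?_⟩
                rw [List.getD_eq_getElem l [] hi'len]
                simp only [pySetEq_iff]
                exact ⟨subS_trans hcon.1 hi0s, subS_trans hi0s' hcon.2⟩
              refine ⟨l[Nat.find hex], Or.inr ?_, subS_trans hi0s hsub⟩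
              rw [mem_Bres l l.length (k + 1) (by omega)]
              exact ⟨Nat.find hex, by omega, hi0lt, rfl, hkeep0⟩
        · refine absurd ?_ hkeep
          unfold keepB
          rw [Bool.and_eq_true, Bool.not_eq_true', Bool.not_eq_true']
          exact ⟨by simpa using h1, by simpa using h2⟩

-- the key pointwise equivalence of the two loop conditions
lemma key_cond (l : List (List Int)) (k : Nat) (hk : k < l.length) :
    ((l.take k ++ Bres l (k + 1)).any (fun t => pyIssubset t l[k]))
      = (l.any (fun t => pyProper t l[k]) || (l.take k).any (fun t => pySetEq t l[k])) := by
  rw [Bool.eq_iff_iff]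
  simp only [List.any_eq_true, List.mem_append, pyIssubset_iff, pyProper_iff, pySetEq_iff,
    Bool.or_eq_true]
  constructor
  · rintro ⟨t, ht | ht, hsub⟩
    · by_cases hback : SubS l[k] t
      · exact Or.inr ⟨t, ht, hsub, hback⟩
      · exact Or.inl ⟨t, List.mem_of_mem_take ht, hsub, hback⟩
    · rw [mem_Bres l l.length (k + 1) (by omega) t] at ht
      obtain ⟨j, hkj, hj, rfl, hkeep⟩ := ht
      by_cases hback : SubS l[k] l[j]
      · exfalso
        have hgd : l.getD j [] = l[j] := List.getD_eq_getElem l [] hj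
        unfold keepB at hkeep
        rw [Bool.and_eq_true, Bool.not_eq_true', Bool.not_eq_true'] at hkeep
        have h2 := hkeep.2
        rw [List.any_eq_false] at h2
        have := h2 _ (getElem_mem_take (show k < j by omega) hk)
        rw [hgd] at this
        simp only [pySetEq_iff] at this
        exact this ⟨hback, hsub⟩
      · exact Or.inl ⟨l[j], List.getElem_mem hj, hsub, hback⟩
  · rintro (⟨t, ht, hsub, hback⟩ | ⟨t, ht, hsub, hback⟩)
    · obtain ⟨j, hj, rfl⟩ := List.mem_iff_getElem.mp ht
      exact witnessW l k hk (l[j]).toFinset.card j hj (le_refl _) hsub hback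
    · exact ⟨t, Or.inl ht, hsub⟩

lemma main_loop (l : List (List Int)) :
    ∀ k, k ≤ l.length → pvALoop k (l.take k) (Bres l k) = Bres l 0 := by
  intro k
  induction k with
  | zero => intro _; rfl
  | succ k ih =>
    intro hk1
    have hk : k < l.length := by omega
    have hgd : l.getD k [] = l[k] := List.getD_eq_getElem l [] hk
    have htake : l.take (k + 1) = l.take k ++ [l[k]] := by
      rw [List.take_add_one]
      simp [List.getElem?_eq_getElem hk]
    have IH := ih (by omega)
    rw [Bres_succ l k hk, stepB_eq] at IH
    rw [htake]
    simp only [pvALoop, PySem.List.pop?_last]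
    rw [key_cond l k hk]
    have hcond : (l.any (fun t => pyProper t l[k]) || (l.take k).any (fun t => pySetEq t l[k]))
        = !(keepB l k) := by
      simp only [keepB, hgd]
      simp [Bool.not_and]
    rw [hcond]
    cases hkeep : keepB l k with
    | true =>
      rw [hkeep] at IH
      simp only [if_true, hgd] at IH
      simpa using IH
    | false =>
      rw [hkeep] at IH
      simp only [Bool.false_eq_true, if_false] at IH
      simpa using IH

-- ===== VERDICT (by name: the statement is the Claim_ definition above) =====
theorem minimal_sets_within_spec : Claim_equal_minimal_sets_within := by
  intro l _
  unfold Spec_minimal_sets_within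
  rw [alt_eq_Bres]
  have h := main_loop l l.length (le_refl _)
  rw [List.take_of_length_le (le_refl _), Bres_ge l l.length (le_refl _)] at h
  exact h
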